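-- pv_equiv track=rewrite | github.com/jaredj/chorpro-simplify | streamlit_app.py | condense_spacing
-- ===== SOURCE A (Python) =====
-- def split_into_elements(text):
--     elements = []
--     in_chord = False
--     current_content = ''
--     current_type = ''
--     for char in text:
--         if char == '[':
--             if current_content:
--                 elements.append({'type': current_type, 'content': current_content})
--             in_chord = True
--             current_content = '['
--             current_type = 'chord'
--         elif char == ']':
--             current_content += ']'
--             elements.append({'type': current_type, 'content': current_content})
--             in_chord = False
--             current_content = ''
--         elif in_chord:
--             current_content += char
--         else:
--             if char.strip():
--                 if current_type != 'lyric':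
--                     if current_content:
--                         elements.append({'type': current_type, 'content': current_content})
--                     current_type = 'lyric'
--                     current_content = ''
--                 current_content += char
--             else:
--                 if current_type != 'space':
--                     if current_content:
--                         elements.append({'type': current_type, 'content': current_content})
--                     current_type = 'space'
--                     current_content = ''
--                 current_content += char
--     if current_content:
--         elements.append({'type': current_type, 'content': current_content})
--     return elements
--
-- def split_into_sections(elements):
--     first_lyric_idx = next((i for i, el in enumerate(elements) if el['type'] == 'lyric'), None)
--     last_lyric_idx = next((i for i, el in enumerate(reversed(elements)) if el['type'] == 'lyric'), None)
--     if last_lyric_idx is not None: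
--         last_lyric_idx = len(elements) - 1 - last_lyric_idx
--     sections = {
--         'beginning': elements[:first_lyric_idx] if first_lyric_idx is not None else [],
--         'middle': elements[first_lyric_idx:last_lyric_idx+1] if first_lyric_idx is not None and last_lyric_idx is not None else [],
--         'end': elements[last_lyric_idx+1:] if last_lyric_idx is not None else []
--     }
--     return sections
--
-- def transform_beginning(beginning_section):
--     transformed_beginning = []
--     beginning_section = [el for i, el in enumerate(beginning_section) if not (el['type'] == 'space' and (i == 0 or i == len(beginning_section) - 1))]
--     for el in beginning_section:
--         if el['type'] == 'space':
--             transformed_beginning.append({'type': 'space', 'content': ' '})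
--         else:
--             transformed_beginning.append(el)
--     return transformed_beginning
--
-- def transform_middle(middle_section):
--     transformed_middle = []
--     prev_was_chord = False
--     for el in middle_section:
--         if el['type'] == 'space':
--             if not prev_was_chord:
--                 transformed_middle.append({'type': 'space', 'content': ' '})
--         else:
--             transformed_middle.append(el)
--             if el['type'] == 'chord':
--                 prev_was_chord = True
--             else:
--                 prev_was_chord = False
--     return transformed_middle
--
-- def assemble_line(beginning, middle, end):
--     return ''.join([el['content'] for el in beginning + middle + end])
--
-- def condense_spacing(line: str) -> str:
--     parsed_elements = split_into_elements(line)
--     has_lyric = any(el['type'] == 'lyric' for el in parsed_elements)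
--
--     if not has_lyric:
--         return line
--
--     sections = split_into_sections(parsed_elements)
--     transformed_beginning = transform_beginning(sections['beginning'])
--     transformed_middle = transform_middle(sections['middle'])
--
--     return assemble_line(transformed_beginning, transformed_middle, sections['end'])
-- ===== SOURCE B (Python) =====
-- def _tokenize(s):
--     # one index-driven scan producing (kind, text) segments; chords are consumed
--     # by an inner bracket scan, lyric/space characters accumulate into runs
--     segs = []
--     i, n = 0, len(s)
--     run_type = ''
--     run = []
--     while i < n:
--         ch = s[i]
--         if ch == '[':
--             if run:
--                 segs.append((run_type, ''.join(run)))
--                 run = []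
--             j = i + 1
--             while j < n and s[j] != '[' and s[j] != ']':
--                 j += 1
--             if j < n and s[j] == ']':
--                 segs.append(('chord', s[i:j + 1]))
--                 i = j + 1
--             else:
--                 segs.append(('chord', s[i:j]))
--                 i = j
--             run_type = 'chord'
--         elif ch == ']':
--             segs.append((run_type, ''.join(run) + ']'))
--             run = []
--             i += 1
--         else:
--             t = 'lyric' if ch.strip() else 'space'
--             if t != run_type:
--                 if run:
--                     segs.append((run_type, ''.join(run)))
--                 run = []
--                 run_type = t
--             run.append(ch)
--             i += 1
--     if run:
--         segs.append((run_type, ''.join(run)))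
--     return segs
--
--
-- def condense_spacing(line: str) -> str:
--     segs = _tokenize(line)
--     k = 0
--     while k < len(segs) and segs[k][0] != 'lyric':
--         k += 1
--     if k == len(segs):
--         return line
--     beginning, rest = segs[:k], segs[k:]
--     m = len(rest)
--     while rest[m - 1][0] != 'lyric':
--         m -= 1
--     middle, end = rest[:m], rest[m:]
--     if beginning and beginning[0][0] == 'space':
--         beginning = beginning[1:]
--     if beginning and beginning[-1][0] == 'space':
--         beginning = beginning[:-1]
--     out = []
--     for t, c in beginning:
--         out.append(' ' if t == 'space' else c)
--     prev_chord = False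
--     for t, c in middle:
--         if t == 'space':
--             if not prev_chord:
--                 out.append(' ')
--         else:
--             out.append(c)
--             prev_chord = t == 'chord'
--     for _, c in end:
--         out.append(c)
--     return ''.join(out)
-- ===== Notes on version B (the rewrite author's own statement) =====
-- stated objective: alternative
-- what changed: B replaces A's staged pipeline (char-state-machine tokenizer into 'dict' elements, slicing into a beginning/middle/end sections dict via enumerate/reversed searches, three separate transform helpers, then join) by an index-driven tokenizer whose inner bracket scan eats a whole chord at once, first/last-lyric boundaries found by two direct scans, and a single output pass that emits condensed string pieces directly.
import Mathlib
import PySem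

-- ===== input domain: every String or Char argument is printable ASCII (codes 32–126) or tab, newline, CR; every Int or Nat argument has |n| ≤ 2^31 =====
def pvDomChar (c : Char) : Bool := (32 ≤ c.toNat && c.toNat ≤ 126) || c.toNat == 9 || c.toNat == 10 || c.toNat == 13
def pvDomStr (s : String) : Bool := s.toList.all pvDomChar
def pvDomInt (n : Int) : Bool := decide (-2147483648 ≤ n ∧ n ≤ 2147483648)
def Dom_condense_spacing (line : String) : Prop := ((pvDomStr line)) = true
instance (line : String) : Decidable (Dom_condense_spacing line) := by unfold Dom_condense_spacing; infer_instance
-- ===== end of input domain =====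

-- B replaces A's slice-into-three-sections pipeline (section dict + three transform
-- helper functions over element dicts) by one index-driven tokenizer and a single
-- output pass; objective: simpler/alternative decomposition, same exact results.

-- ===== PORT A =====
-- truthiness of Python's `char.strip()` for a single character
def pvKeep (c : Char) : Bool := !(PySem.Chars.strip [c]).isEmpty

def isLyric (e : String × List Char) : Bool := e.1 == "lyric"

-- one loop iteration of split_into_elements; state = (elements, in_chord, current_content, current_type)
def csStep (st : List (String × List Char) × Bool × List Char × String) (ch : Char) :
    List (String × List Char) × Bool × List Char × String :=
  let elements := st.1
  let inChord := st.2.1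
  let cur := st.2.2.1
  let curType := st.2.2.2
  if ch = '[' then
    ((if cur ≠ [] then elements ++ [(curType, cur)] else elements), true, ['['], "chord")
  else if ch = ']' then
    (elements ++ [(curType, cur ++ [']'])], false, [], curType)
  else if inChord then
    (elements, inChord, cur ++ [ch], curType)
  else if pvKeep ch then
    (if curType ≠ "lyric" then
      ((if cur ≠ [] then elements ++ [(curType, cur)] else elements), inChord, [ch], "lyric")
    else (elements, inChord, cur ++ [ch], curType))
  else
    (if curType ≠ "space" then
      ((if cur ≠ [] then elements ++ [(curType, cur)] else elements), inChord, [ch], "space")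
    else (elements, inChord, cur ++ [ch], curType))

def split_into_elements_port (text : List Char) : List (String × List Char) :=
  let st := text.foldl csStep ([], false, [], "")
  if st.2.2.1 ≠ [] then st.1 ++ [(st.2.2.2, st.2.2.1)] else st.1

def split_into_sections_port (elements : List (String × List Char)) :
    List (String × List Char) × List (String × List Char) × List (String × List Char) :=
  let f? := elements.findIdx? isLyric
  let r? := elements.reverse.findIdx? isLyric
  let l? := r?.map (fun r => elements.length - 1 - r)
  ((match f? with
    | some f => PySem.List.slice elements none (some (f : Int))
    | none => []),
   (match f?, l? with
    | some f, some l => PySem.List.slice elements (some (f : Int)) (some ((l : Int) + 1))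
    | _, _ => []),
   (match l? with
    | some l => PySem.List.slice elements (some ((l : Int) + 1)) none
    | none => []))

def transform_beginning_port (b : List (String × List Char)) : List (String × List Char) :=
  let b2 := ((PySem.List.enumerate b 0).filter
      (fun p => !(p.2.1 == "space" && (p.1 == 0 || p.1 == PySem.List.len b - 1)))).map (·.2)
  b2.foldl (fun acc el => if el.1 == "space" then acc ++ [("space", [' '])] else acc ++ [el]) []

def transform_middle_port (m : List (String × List Char)) : List (String × List Char) :=
  (m.foldl (fun (st : List (String × List Char) × Bool) el =>
      if el.1 == "space" then
        (if !st.2 then (st.1 ++ [("space", [' '])], st.2) else st)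
      else
        (st.1 ++ [el], el.1 == "chord")) ([], false)).1

def assemble_line_port (b m e : List (String × List Char)) : String :=
  String.ofList (((b ++ m ++ e).map (·.2)).flatten)

def condense_spacing (line : String) : String :=
  let parsed := split_into_elements_port line.toList
  let hasLyric := parsed.any isLyric
  if !hasLyric then line
  else
    let s := split_into_sections_port parsed
    assemble_line_port (transform_beginning_port s.1) (transform_middle_port s.2.1) s.2.2

-- ===== PORT B =====
-- a character that is neither '[' nor ']' (the inner chord scan of _tokenize)
def pvNB (c : Char) : Bool := !(c == '[') && !(c == ']')

-- _tokenize: index-driven scan; chords eaten by an inner bracket scan (takeWhile/dropWhile),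
-- lyric/space characters accumulate into runs (run_type, run)
def tokB : List Char → String → List Char → List (String × List Char)
  | [], rt, run => if run = [] then [] else [(rt, run)]
  | c :: cs, rt, run =>
    if c = '[' then
      let pre := if run = [] then [] else [(rt, run)]
      let taken := cs.takeWhile pvNB
      let rest := cs.dropWhile pvNB
      if rest ≠ [] ∧ rest.headI = ']' then
        pre ++ ("chord", '[' :: (taken ++ [']'])) :: tokB rest.tail "chord" []
      else
        pre ++ ("chord", '[' :: taken) :: tokB rest "chord" []
    else if c = ']' then
      (rt, run ++ [']']) :: tokB cs rt []
    else
      let t := if pvKeep c then "lyric" else "space"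
      if t ≠ rt then
        (if run = [] then [] else [(rt, run)]) ++ tokB cs t [c]
      else
        tokB cs rt (run ++ [c])
termination_by cs _ _ => cs.length
decreasing_by
  · have h1 := List.length_dropWhile_le pvNB cs
    have h2 : (List.dropWhile pvNB cs).tail.length ≤ (List.dropWhile pvNB cs).length := by
      simp [List.length_tail]
    simp
    omega
  · have h1 := List.length_dropWhile_le pvNB cs
    simp
    omega
  · simp
  · simp
  · simp

-- the m-decrementing while loop: while rest[m-1][0] != 'lyric': m -= 1
def mLast (rest : List (String × List Char)) : Nat → Nat
  | 0 => 0
  | m + 1 => if (rest.getD m ("", [])).1 == "lyric" then m + 1 else mLast rest m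

def condense_spacing_alt (line : String) : String :=
  let segs := tokB line.toList "" []
  let k := segs.findIdx isLyric
  if k = segs.length then line
  else
    let beginning := segs.take k
    let rest := segs.drop k
    let m := mLast rest rest.length
    let middle := rest.take m
    let endSegs := rest.drop m
    let b1 := match beginning with
      | e :: bs => if e.1 == "space" then bs else beginning
      | [] => beginning
    let b2 := match b1.getLast? with
      | some e => if e.1 == "space" then b1.dropLast else b1
      | none => b1
    let out1 := b2.foldl (fun acc e => acc ++ [if e.1 == "space" then [' '] else e.2])
        ([] : List (List Char))
    let stM := middle.foldl (fun (st : List (List Char) × Bool) e =>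
        if e.1 == "space" then (if st.2 then st else (st.1 ++ [[' ']], st.2))
        else (st.1 ++ [e.2], e.1 == "chord")) (out1, false)
    let out := endSegs.foldl (fun acc e => acc ++ [e.2]) stM.1
    String.ofList out.flatten

-- ===== PRECONDITION & SPEC =====
def Spec_condense_spacing (line : String) (out : String) : Prop := out = condense_spacing_alt line
instance (line : String) (out : String) : Decidable (Spec_condense_spacing line out) := by unfold Spec_condense_spacing; infer_instance

-- ===== CLAIM (what is proved, stated in full; the proofs are below) =====
def Claim_equal_condense_spacing : Prop := ∀ (line : String), Dom_condense_spacing line → Spec_condense_spacing line (condense_spacing line)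

-- ===== LEMMAS AND PROOFS =====

-- A's final flush after the character loop
def finishA (st : List (String × List Char) × Bool × List Char × String) :
    List (String × List Char) :=
  if st.2.2.1 ≠ [] then st.1 ++ [(st.2.2.2, st.2.2.1)] else st.1

theorem chordRun (cs : List Char) (h : ∀ c ∈ cs, pvNB c = true) :
    ∀ elems p ct, List.foldl csStep (elems, true, p, ct) cs = (elems, true, p ++ cs, ct) := by
  induction cs with
  | nil => intro elems p ct; simp
  | cons c cs ih =>
    intro elems p ct
    have hc := h c (by simp)
    have h12 : ¬ c = '[' ∧ ¬ c = ']' := by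
      constructor <;> intro hh <;> subst hh <;> simp [pvNB] at hc
    have hstep : csStep (elems, true, p, ct) c = (elems, true, p ++ [c], ct) := by
      simp [csStep, h12.1, h12.2]
    rw [List.foldl_cons, hstep, ih (fun d hd => h d (by simp [hd]))]
    simp

theorem tok_bridge : ∀ n (cs : List Char), cs.length ≤ n → ∀ elems rt run,
    finishA (List.foldl csStep (elems, false, run, rt) cs) = elems ++ tokB cs rt run := by
  intro n
  induction n with
  | zero =>
    intro cs hcs elems rt run
    have hnil : cs = [] := List.eq_nil_of_length_eq_zero (Nat.le_zero.mp hcs)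
    subst hnil
    by_cases hr : run = [] <;> simp [tokB, finishA, hr]
  | succ n ih =>
    intro cs hcs elems rt run
    cases cs with
    | nil => by_cases hr : run = [] <;> simp [tokB, finishA, hr]
    | cons c cs' =>
      have hlen' : cs'.length ≤ n := by simp at hcs; omega
      by_cases hob : c = '['
      · subst hob
        have hstep : csStep (elems, false, run, rt) '[' =
            (elems ++ (if run = [] then [] else [(rt, run)]), true, ['['], "chord") := by
          by_cases hr : run = [] <;> simp [csStep, hr]
        have hmem : ∀ d ∈ cs'.takeWhile pvNB, pvNB d = true := fun d hd => List.mem_takeWhile_imp hd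
        have e1 : List.foldl csStep (elems, false, run, rt) ('[' :: cs') =
            List.foldl csStep
              (elems ++ (if run = [] then [] else [(rt, run)]), true, '[' :: cs'.takeWhile pvNB, "chord")
              (cs'.dropWhile pvNB) := by
          rw [List.foldl_cons, hstep]
          conv_lhs => rw [← List.takeWhile_append_dropWhile (p := pvNB) (l := cs')]
          rw [List.foldl_append, chordRun _ hmem]
          simp
        rw [e1]
        rcases hdw : cs'.dropWhile pvNB with _ | ⟨d, rest'⟩
        · simp only [tokB, if_pos rfl, hdw]
          by_cases hr : run = [] <;> simp [finishA, tokB, hr, hdw]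
        · have hd : pvNB d = false := by
            have h0 := List.head?_dropWhile_not pvNB cs'
            rw [hdw] at h0
            simpa using h0
          have hrest_le : rest'.length + 1 ≤ cs'.length := by
            have := List.length_dropWhile_le pvNB cs'
            rw [hdw] at this; simpa using this
          by_cases hdc : d = ']'
          · subst hdc
            have hstep2 : csStep (elems ++ (if run = [] then [] else [(rt, run)]), true,
                '[' :: cs'.takeWhile pvNB, "chord") ']' =
                (elems ++ (if run = [] then [] else [(rt, run)]) ++
                  [("chord", ('[' :: cs'.takeWhile pvNB) ++ [']'])], false, [], "chord") := by
              simp [csStep]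
            rw [List.foldl_cons, hstep2, ih rest' (by omega) _ _ _]
            simp only [tokB, if_pos rfl, hdw]
            by_cases hr : run = [] <;> simp [hr]
          · have hdo : d = '[' := by
              have : d = '[' ∨ d = ']' := by
                by_contra hcon
                push_neg at hcon
                simp [pvNB, hcon.1, hcon.2] at hd
              tauto
            subst hdo
            have hstep3 : csStep (elems ++ (if run = [] then [] else [(rt, run)]), true,
                '[' :: cs'.takeWhile pvNB, "chord") '[' =
                (elems ++ (if run = [] then [] else [(rt, run)]) ++
                  [("chord", '[' :: cs'.takeWhile pvNB)], true, ['['], "chord") := by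
              simp [csStep]
            have hstep4 : csStep (elems ++ (if run = [] then [] else [(rt, run)]) ++
                  [("chord", '[' :: cs'.takeWhile pvNB)], false, [], "chord") '[' =
                (elems ++ (if run = [] then [] else [(rt, run)]) ++
                  [("chord", '[' :: cs'.takeWhile pvNB)], true, ['['], "chord") := by
              simp [csStep]
            rw [List.foldl_cons, hstep3, ← hstep4, ← List.foldl_cons]
            rw [ih ('[' :: rest') (by simp only [List.length_cons]; omega) _ _ _]
            simp only [tokB, if_pos rfl, hdw]
            by_cases hr : run = [] <;> simp [hr]
      · by_cases hcl : c = ']'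
        · subst hcl
          have hstep : csStep (elems, false, run, rt) ']' =
              (elems ++ [(rt, run ++ [']'])], false, [], rt) := by
            simp [csStep]
          rw [List.foldl_cons, hstep, ih cs' hlen' _ _ _]
          simp [tokB]
        · rcases hk : pvKeep c with _ | _
          · by_cases hrt : rt = "space"
            · subst hrt
              have hstep : csStep (elems, false, run, "space") c =
                  (elems, false, run ++ [c], "space") := by
                simp [csStep, hob, hcl, hk]
              rw [List.foldl_cons, hstep, ih cs' hlen' _ _ _]
              simp [tokB, hob, hcl, hk]
            · have hrt' : ¬ ("space" : String) = rt := fun h => hrt h.symm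
              have hstep : csStep (elems, false, run, rt) c =
                  (elems ++ (if run = [] then [] else [(rt, run)]), false, [c], "space") := by
                by_cases hr : run = [] <;> simp [csStep, hob, hcl, hk, hrt, hr]
              rw [List.foldl_cons, hstep, ih cs' hlen' _ _ _]
              simp [tokB, hob, hcl, hk, hrt']
          · by_cases hrt : rt = "lyric"
            · subst hrt
              have hstep : csStep (elems, false, run, "lyric") c =
                  (elems, false, run ++ [c], "lyric") := by
                simp [csStep, hob, hcl, hk]
              rw [List.foldl_cons, hstep, ih cs' hlen' _ _ _]
              simp [tokB, hob, hcl, hk]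
            · have hrt' : ¬ ("lyric" : String) = rt := fun h => hrt h.symm
              have hstep : csStep (elems, false, run, rt) c =
                  (elems ++ (if run = [] then [] else [(rt, run)]), false, [c], "lyric") := by
                by_cases hr : run = [] <;> simp [csStep, hob, hcl, hk, hrt, hr]
              rw [List.foldl_cons, hstep, ih cs' hlen' _ _ _]
              simp [tokB, hob, hcl, hk, hrt']

theorem tok_eq (text : List Char) : split_into_elements_port text = tokB text "" [] := by
  have h := tok_bridge text.length text le_rfl [] "" []
  simpa [split_into_elements_port, finishA] using h

theorem mLast_congr (ys zs : List (String × List Char)) :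
    ∀ j, j ≤ ys.length → mLast (ys ++ zs) j = mLast ys j := by
  intro j
  induction j with
  | zero => intro _; rfl
  | succ j ih =>
    intro hj
    have hg : (ys ++ zs).getD j ("", []) = ys.getD j ("", []) :=
      List.getD_append _ _ _ _ (by omega)
    simp only [mLast, hg]
    by_cases hc : (ys.getD j ("", [])).1 = "lyric" <;> simp [ih (by omega)]

theorem mLast_spec (rest : List (String × List Char)) (h : ∃ e ∈ rest, isLyric e = true) :
    mLast rest rest.length = rest.length - List.findIdx isLyric rest.reverse := by
  induction rest using List.reverseRecOn with
  | nil => simp at h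
  | append_singleton ys y ih =>
    have hlen : (ys ++ [y]).length = ys.length + 1 := by simp
    have hg : (ys ++ [y]).getD ys.length ("", []) = y := by
      simp [List.getD_eq_getElem?_getD]
    rw [hlen]
    simp only [mLast, hg, List.reverse_append, List.reverse_singleton, List.singleton_append,
      List.findIdx_cons]
    by_cases hy : y.1 = "lyric"
    · have hly : isLyric y = true := by simp [isLyric, hy]
      rw [if_pos (by simp [hy]), hly, Bool.cond_true]
      omega
    · have hly : isLyric y = false := by simp [isLyric, hy]
      have hys : ∃ e ∈ ys, isLyric e = true := by
        rcases h with ⟨e, he, hle⟩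
        rcases List.mem_append.mp he with h1 | h1
        · exact ⟨e, h1, hle⟩
        · simp at h1; subst h1; simp [isLyric, hy] at hle
      rw [if_neg (by simp [hy]), mLast_congr ys [y] ys.length le_rfl, ih hys, hly,
        Bool.cond_false]
      omega

theorem tb_filter (xs : List (String × List Char)) (s L : Int) (hs : 1 ≤ s)
    (hL : L = s + xs.length - 1) (hxs : xs ≠ []) :
    ((PySem.List.enumerate xs s).filter
        (fun p => !(p.2.1 == "space" && (p.1 == 0 || p.1 == L)))).map (·.2) =
      if (xs.getLast hxs).1 == "space" then xs.dropLast else xs := by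
  induction xs generalizing s L with
  | nil => exact absurd rfl hxs
  | cons x xs ih =>
    rcases eq_or_ne xs [] with hx | hx
    · subst hx
      have hLs : L = s := by simp at hL; omega
      subst hLs
      rw [PySem.List.enumerate_cons, PySem.List.enumerate_nil, List.filter_cons]
      by_cases hsp : x.1 = "space"
      · rw [if_neg (by simp [hsp])]
        simp [hsp]
      · rw [if_pos (by simp [hsp])]
        simp [hsp]
    · have hxslen : 0 < xs.length := List.length_pos_of_ne_nil hx
      have hLv : L = s + xs.length := by
        simp only [List.length_cons] at hL
        push_cast at hL
        omega
      have hL2 : L = (s + 1) + xs.length - 1 := by omega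
      have hs0 : ((s : Int) == (0 : Int)) = false := by simp; omega
      have hsL : ((s : Int) == L) = false := by
        simp
        have : (1 : Int) ≤ (xs.length : Int) := by exact_mod_cast hxslen
        omega
      rw [PySem.List.enumerate_cons, List.filter_cons,
        if_pos (by simp [hs0, hsL]), List.map_cons,
        ih (s + 1) L (by omega) hL2 hx]
      rw [List.getLast_cons hx]
      by_cases hlast : (xs.getLast hx).1 = "space"
      · simp [hlast, List.dropLast_cons_of_ne_nil hx]
      · simp [hlast]

theorem tb_eq (b : List (String × List Char)) :
    ((PySem.List.enumerate b 0).filter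
        (fun p => !(p.2.1 == "space" && (p.1 == 0 || p.1 == PySem.List.len b - 1)))).map (·.2) =
      (let b1 := match b with
        | e :: bs => if e.1 == "space" then bs else b
        | [] => b
       match b1.getLast? with
       | some e => if e.1 == "space" then b1.dropLast else b1
       | none => b1) := by
  match b with
  | [] => simp [PySem.List.enumerate_nil]
  | [x] =>
    by_cases hsp : x.1 = "space" <;>
      simp [PySem.List.enumerate_cons, PySem.List.enumerate_nil, hsp]
  | x :: y :: ys =>
    have hx : (y :: ys) ≠ [] := List.cons_ne_nil _ _
    have hL : (PySem.List.len (x :: y :: ys) - 1 : Int) = 1 + ((y :: ys).length : Int) - 1 := by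
      simp only [PySem.List.len_eq, List.length_cons]
      push_cast
      ring
    rw [PySem.List.enumerate_cons, List.filter_cons]
    by_cases hsp : x.1 = "space"
    · rw [if_neg (by simp [hsp])]
      rw [show ((0 : Int) + 1) = 1 from by norm_num]
      rw [tb_filter (y :: ys) 1 (PySem.List.len (x :: y :: ys) - 1) (by norm_num) hL hx]
      by_cases hlast : ((y :: ys).getLast hx).1 = "space" <;>
        simp [hsp, hlast, List.getLast?_eq_some_getLast hx]
    · rw [if_pos (by simp [hsp]), List.map_cons,
        show ((0 : Int) + 1) = 1 from by norm_num,
        tb_filter (y :: ys) 1 (PySem.List.len (x :: y :: ys) - 1) (by norm_num) hL hx]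
      have hgl : (x :: y :: ys).getLast (List.cons_ne_nil _ _) = (y :: ys).getLast hx :=
        List.getLast_cons hx
      by_cases hlast : ((y :: ys).getLast hx).1 = "space" <;>
        simp [hsp, hlast, List.getLast?_eq_some_getLast, hgl, List.dropLast_cons_of_ne_nil hx]

theorem tb_fold (lst : List (String × List Char)) :
    ∀ (accA : List (String × List Char)) (accB : List (List Char)), accB = accA.map (·.2) →
    (lst.foldl (fun acc el => if el.1 == "space" then acc ++ [("space", [' '])] else acc ++ [el]) accA).map (·.2) =
      lst.foldl (fun acc e => acc ++ [if e.1 == "space" then [' '] else e.2]) accB := by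
  induction lst with
  | nil => intro accA accB h; simpa using h.symm
  | cons e lst ih =>
    intro accA accB h
    by_cases hs : e.1 = "space"
    · have hT : (e.1 == "space") = true := by simp [hs]
      rw [List.foldl_cons, List.foldl_cons, if_pos hT, if_pos hT]
      exact ih _ _ (by simp [h])
    · have hF : ¬ ((e.1 == "space") = true) := by simp [hs]
      rw [List.foldl_cons, List.foldl_cons, if_neg hF, if_neg hF]
      exact ih _ _ (by simp [h])

theorem tm_fold (lst : List (String × List Char)) :
    ∀ (accA : List (String × List Char)) (accB : List (List Char)) (pc : Bool), accB = accA.map (·.2) →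
    ((lst.foldl (fun (st : List (String × List Char) × Bool) el =>
        if el.1 == "space" then
          (if !st.2 then (st.1 ++ [("space", [' '])], st.2) else st)
        else
          (st.1 ++ [el], el.1 == "chord")) (accA, pc)).1).map (·.2) =
      (lst.foldl (fun (st : List (List Char) × Bool) e =>
        if e.1 == "space" then (if st.2 then st else (st.1 ++ [[' ']], st.2))
        else (st.1 ++ [e.2], e.1 == "chord")) (accB, pc)).1 := by
  induction lst with
  | nil => intro accA accB pc h; simpa using h.symm
  | cons e lst ih =>
    intro accA accB pc h
    by_cases hs : e.1 = "space"
    · have hT : (e.1 == "space") = true := by simp [hs]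
      cases pc with
      | true =>
        rw [List.foldl_cons, List.foldl_cons, if_pos hT, if_pos hT,
          if_neg (by simp : ¬ ((!true) = true)), if_pos (rfl : true = true)]
        exact ih _ _ _ h
      | false =>
        rw [List.foldl_cons, List.foldl_cons, if_pos hT, if_pos hT,
          if_pos (by simp : (!false) = true), if_neg (by simp : ¬ (false = true))]
        exact ih _ _ _ (by simp [h])
    · have hF : ¬ ((e.1 == "space") = true) := by simp [hs]
      rw [List.foldl_cons, List.foldl_cons, if_neg hF, if_neg hF]
      exact ih _ _ _ (by simp [h])

theorem tm_acc (lst : List (String × List Char)) :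
    ∀ (acc : List (List Char)) (pc : Bool),
    (lst.foldl (fun (st : List (List Char) × Bool) e =>
        if e.1 == "space" then (if st.2 then st else (st.1 ++ [[' ']], st.2))
        else (st.1 ++ [e.2], e.1 == "chord")) (acc, pc)).1 =
      acc ++ (lst.foldl (fun (st : List (List Char) × Bool) e =>
        if e.1 == "space" then (if st.2 then st else (st.1 ++ [[' ']], st.2))
        else (st.1 ++ [e.2], e.1 == "chord")) ([], pc)).1 := by
  induction lst with
  | nil => intro acc pc; simp
  | cons e lst ih =>
    intro acc pc
    by_cases hs : e.1 = "space"
    · have hT : (e.1 == "space") = true := by simp [hs]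
      cases pc with
      | true =>
        rw [List.foldl_cons, List.foldl_cons, if_pos hT, if_pos hT,
          if_pos (rfl : true = true), if_pos (rfl : true = true)]
        exact ih acc true
      | false =>
        rw [List.foldl_cons, List.foldl_cons, if_pos hT, if_pos hT,
          if_neg (by simp : ¬ (false = true)), if_neg (by simp : ¬ (false = true))]
        rw [ih (acc ++ [[' ']]) false, ih ([] ++ [[' ']]) false]
        simp
    · have hF : ¬ ((e.1 == "space") = true) := by simp [hs]
      rw [List.foldl_cons, List.foldl_cons, if_neg hF, if_neg hF]
      rw [ih (acc ++ [e.2]) _, ih ([] ++ [e.2]) _]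
      simp

theorem condense_main (line : String) : condense_spacing line = condense_spacing_alt line := by
  simp only [condense_spacing, condense_spacing_alt, split_into_sections_port,
    assemble_line_port, transform_beginning_port, transform_middle_port, tok_eq]
  set segs := tokB line.toList "" [] with hsegs
  by_cases hk : segs.findIdx isLyric = segs.length
  · have hall : ∀ e ∈ segs, isLyric e = false := List.findIdx_eq_length.mp hk
    have hany : segs.any isLyric = false :=
      List.any_eq_false.mpr (fun e he => by simp [hall e he])
    rw [hany, if_pos (show (!false) = true from rfl), if_pos hk]
  · have hklt : segs.findIdx isLyric < segs.length :=
      lt_of_le_of_ne List.findIdx_le_length hk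
    have hex : ∃ e ∈ segs, isLyric e = true := List.findIdx_lt_length.mp hklt
    have hany : segs.any isLyric = true := List.any_eq_true.mpr hex
    have hf : segs.findIdx? isLyric = some (segs.findIdx isLyric) :=
      List.findIdx?_eq_some_of_exists hex
    rw [hany, if_neg (by simp), if_neg hk]
    set k := segs.findIdx isLyric with hkdef
    set rest := segs.drop k with hrestdef
    have hrl : rest.length = segs.length - k := by rw [hrestdef]; exact List.length_drop
    have hrpos : 0 < rest.length := by omega
    have hklyr : isLyric (segs[k]'hklt) = true := List.findIdx_getElem (w := hklt)
    have hexr : ∃ e ∈ rest, isLyric e = true := by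
      refine ⟨rest[0]'hrpos, List.getElem_mem hrpos, ?_⟩
      have h0 : rest[0]'hrpos = segs[k]'hklt := by
        simp [hrestdef, List.getElem_drop]
      rw [h0]; exact hklyr
    have hexrev : ∃ e ∈ rest.reverse, isLyric e = true := by
      rcases hexr with ⟨e, he, hl⟩; exact ⟨e, List.mem_reverse.mpr he, hl⟩
    have hexrevS : ∃ e ∈ segs.reverse, isLyric e = true := by
      rcases hex with ⟨e, he, hl⟩; exact ⟨e, List.mem_reverse.mpr he, hl⟩
    have hrlt : rest.reverse.findIdx isLyric < rest.length := by
      have h1 := List.findIdx_lt_length.mpr hexrev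
      simpa using h1
    have hsegsrev : segs.reverse = rest.reverse ++ (segs.take k).reverse := by
      rw [hrestdef, ← List.reverse_append, List.take_append_drop]
    have hfr : segs.reverse.findIdx isLyric = rest.reverse.findIdx isLyric := by
      rw [hsegsrev, List.findIdx_append, if_pos (by simpa using hrlt)]
    have hfr? : segs.reverse.findIdx? isLyric = some (rest.reverse.findIdx isLyric) := by
      rw [List.findIdx?_eq_some_of_exists hexrevS, hfr]
    set r := rest.reverse.findIdx isLyric with hrdef
    have hm : mLast rest rest.length = rest.length - r := mLast_spec rest hexr
    simp only [hf, hfr?, Option.map_some]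
    have hlast1 : ((segs.length - 1 - r : Nat) : Int) + 1 = ((k + (rest.length - r) : Nat) : Int) := by
      omega
    rw [hlast1, PySem.List.slice_to_natCast, PySem.List.slice_natCast,
      PySem.List.slice_from_natCast]
    have hkmk : k + (rest.length - r) - k = rest.length - r := by omega
    have hdropkm : segs.drop (k + (rest.length - r)) = rest.drop (rest.length - r) := by
      rw [hrestdef, List.drop_drop]
    rw [hkmk, ← hrestdef, hdropkm, hm]
    rw [List.map_append, List.map_append]
    rw [tb_fold _ [] [] rfl, tb_eq (segs.take k), tm_fold _ [] [] false rfl]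
    conv_rhs => rw [PySem.List.foldl_append_singleton_eq_map
      (fun (e : String × List Char) => e.2) (rest.drop (rest.length - r))]
    conv_rhs => rw [tm_acc (rest.take (rest.length - r))]

-- ===== VERDICT (by name: the statement is the Claim_ definition above) =====
theorem condense_spacing_spec : Claim_equal_condense_spacing := by
  intro line _
  exact condense_main line
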